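-- pv_equiv track=rewrite | github.com/openbraininstitute/BlueRecording | bluerecording/getPositions.py | remove_variables
-- ===== SOURCE A (Python) =====
-- def remove_variables(js, finalmorphpath):
--
--     '''
--     Removes references to variables in path to morphology
--     Assumes that all references are in the manifest section
--     '''
--
--     while '$' in finalmorphpath:
--
--         elements = finalmorphpath.split('/')
--
--         for i, element in enumerate(elements):
--
--             if '$' in element:
--                 element = js['manifest'][element]
--
--             if i == 0:
--                 finalmorphpath = element
--             else:
--                 finalmorphpath = finalmorphpath + '/' + element
--
--     return finalmorphpath
-- ===== SOURCE B (Python) =====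
-- def remove_variables(js, finalmorphpath):
--
--     '''
--     Removes references to variables in path to morphology
--     Assumes that all references are in the manifest section
--     '''
--
--     def resolve(path):
--         parts = []
--         for element in path.split('/'):
--             if '$' in element:
--                 element = js['manifest'][element]
--                 if '$' in element:
--                     element = resolve(element)
--             parts.append(element)
--         return '/'.join(parts)
--
--     return resolve(finalmorphpath)
-- ===== Notes on version B (the rewrite author's own statement) =====
-- stated objective: alternative
-- what changed: A repeatedly rescans and rewrites the whole path until no '$' remains (a fixpoint while-loop); B makes one pass over the split path and resolves each referenced value to completion by recursive descent into the nested reference structure.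
import Mathlib
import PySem

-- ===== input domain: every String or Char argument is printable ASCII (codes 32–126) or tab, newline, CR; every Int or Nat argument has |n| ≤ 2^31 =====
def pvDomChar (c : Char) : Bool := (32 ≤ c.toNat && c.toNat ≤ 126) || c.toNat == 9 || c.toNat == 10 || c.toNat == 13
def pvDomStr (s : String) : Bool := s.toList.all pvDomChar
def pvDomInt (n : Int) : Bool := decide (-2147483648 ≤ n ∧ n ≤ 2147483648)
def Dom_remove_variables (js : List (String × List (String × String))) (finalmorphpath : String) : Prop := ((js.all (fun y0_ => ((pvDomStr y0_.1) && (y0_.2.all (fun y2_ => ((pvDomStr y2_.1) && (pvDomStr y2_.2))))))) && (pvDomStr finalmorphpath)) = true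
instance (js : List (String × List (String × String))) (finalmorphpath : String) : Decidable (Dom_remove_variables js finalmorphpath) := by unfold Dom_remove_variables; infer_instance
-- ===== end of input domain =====

-- B replaces A's iterate-until-no-'$' fixpoint while-loop by a single recursive descent over the
-- nested reference structure (objective: alternative decomposition, same result wherever A returns).

-- ===== PORT A =====
-- js['manifest'][element]; Python raises KeyError when either key is missing — those inputs are
-- excluded by Pre_remove_variables, the port returns the element unchanged there.
def pvLookupA (js : List (String × List (String × String))) (element : String) : String :=
  match (PySem.Dict.mk js).get? "manifest" with
  | none => element
  | some m =>
    match (PySem.Dict.mk m).get? element with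
    | none => element
    | some v => v

-- one execution of the body of A's while-loop: split, resolve each element, rebuild the string
def pvPassA (js : List (String × List (String × String))) (p : String) : String :=
  let elements := (PySem.Str.split? p "/").getD []   -- sep "/" ≠ "": split? never returns none
  (PySem.List.enumerate elements).foldl
    (fun finalmorphpath ie =>
      let element := if PySem.Str.isIn "$" ie.2 then pvLookupA js ie.2 else ie.2
      if ie.1 == 0 then element else finalmorphpath ++ "/" ++ element)
    p

-- A's 'while "$" in finalmorphpath' loop, made total with fuel. Under Pre_ the loop exits after at
-- most (manifest size + 2) passes (a bound proved exact: a deeper terminating chain would repeat a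
-- manifest key and hence cycle forever), so this fuel computes exactly what Python's loop computes.
def pvLoopA (js : List (String × List (String × String))) : Nat → String → String
  | 0, p => p
  | fuel + 1, p =>
    if PySem.Str.isIn "$" p then pvLoopA js fuel (pvPassA js p) else p

def remove_variables (js : List (String × List (String × String))) (finalmorphpath : String) : String :=
  pvLoopA js ((((PySem.Dict.mk js).get? "manifest").getD []).length + 3) finalmorphpath

-- ===== PORT B =====
-- Source B's recursive resolve(path); fuel makes the recursion total (under Pre_ the recursion depth is
-- at most manifest size + 2, same exact bound as for A's loop, so this fuel computes what Python computes)
def pvResolveB (js : List (String × List (String × String))) : Nat → String → String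
  | 0, path => path
  | fuel + 1, path =>
    PySem.Str.join "/"
      (((PySem.Str.split? path "/").getD []).map (fun element =>
        if PySem.Str.isIn "$" element then
          let v := match (PySem.Dict.mk js).get? "manifest" with
                   | none => element   -- KeyError in Python; outside Pre_
                   | some m =>
                     match (PySem.Dict.mk m).get? element with
                     | none => element -- KeyError in Python; outside Pre_
                     | some v => v
          if PySem.Str.isIn "$" v then pvResolveB js fuel v else v
        else element))

def remove_variables_alt (js : List (String × List (String × String))) (finalmorphpath : String) : String :=
  pvResolveB js ((((PySem.Dict.mk js).get? "manifest").getD []).length + 3) finalmorphpath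

-- ===== PRECONDITION & SPEC =====
-- pvOk n p: every '$'-element reachable from p through the manifest has an entry, and all
-- references resolve within n levels of nesting.
def pvOk (js : List (String × List (String × String))) : Nat → String → Bool
  | 0, p => !PySem.Str.isIn "$" p
  | n + 1, p =>
    ((PySem.Str.split? p "/").getD []).all (fun e =>
      !PySem.Str.isIn "$" e ||
        (match (PySem.Dict.mk js).get? "manifest" with
         | none => false
         | some m =>
           match (PySem.Dict.mk m).get? e with
           | none => false
           | some v => pvOk js n v))

-- Pre_ excludes exactly the inputs on which A does not return: where a reachable '$'-element has no
-- manifest entry (A raises KeyError) or the manifest references are cyclic (A's while-loop runs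
-- forever). The depth bound (manifest size + 2) loses nothing: a terminating resolution can never
-- nest deeper, since a longer chain would repeat a manifest key and therefore cycle forever.
def Pre_remove_variables (js : List (String × List (String × String))) (finalmorphpath : String) : Prop :=
  pvOk js ((((PySem.Dict.mk js).get? "manifest").getD []).length + 2) finalmorphpath = true
instance (js : List (String × List (String × String))) (finalmorphpath : String) : Decidable (Pre_remove_variables js finalmorphpath) := by unfold Pre_remove_variables; infer_instance

def pvWitness_remove_variables : (List (String × List (String × String))) × String :=
  ([("manifest", [("$A", "$B/x"), ("$B", "y")])], "$A/cell.swc")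

def Spec_remove_variables (js : List (String × List (String × String))) (finalmorphpath : String) (out : String) : Prop := out = remove_variables_alt js finalmorphpath
instance (js : List (String × List (String × String))) (finalmorphpath : String) (out : String) : Decidable (Spec_remove_variables js finalmorphpath out) := by unfold Spec_remove_variables; infer_instance

-- ===== CLAIM (what is proved, stated in full; the proofs are below) =====
def Claim_equal_remove_variables : Prop := ∀ (js : List (String × List (String × String))) (finalmorphpath : String), Dom_remove_variables js finalmorphpath → Pre_remove_variables js finalmorphpath → Spec_remove_variables js finalmorphpath (remove_variables js finalmorphpath)

-- ===== LEMMAS AND PROOFS =====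

-- proof-side abbreviation for Python's path.split('/')
def pvSplit (p : String) : List String := (PySem.Str.split? p "/").getD []

-- proof-side structural model of splitting a character list on '/'
def pvSplitP : List Char → List (List Char)
  | [] => [[]]
  | c :: r => if c = '/' then [] :: pvSplitP r else (c :: (pvSplitP r).headI) :: (pvSplitP r).tail

theorem pvSplitP_ne_nil : ∀ l, pvSplitP l ≠ [] := by
  intro l
  cases l with
  | nil => simp [pvSplitP]
  | cons c r => by_cases hc : c = '/' <;> simp [pvSplitP, hc]

theorem pvSplitP_shape (l : List Char) : pvSplitP l = (pvSplitP l).headI :: (pvSplitP l).tail := by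
  cases h : pvSplitP l with
  | nil => exact absurd h (pvSplitP_ne_nil l)
  | cons a t => simp

-- characterization of PySem's split worker in terms of pvSplitP
theorem pv_go_char : ∀ (l : List Char) (fuel : Nat) (cur : List Char) (acc : List (List Char)),
    l.length < fuel →
    PySem.Chars.splitOn.go ['/'] fuel l cur acc
      = acc.reverse ++ ((cur.reverse ++ (pvSplitP l).headI) :: (pvSplitP l).tail) := by
  intro l
  induction l with
  | nil =>
    intro fuel cur acc h
    cases fuel with
    | zero => omega
    | succ f => simp [PySem.Chars.splitOn.go, pvSplitP]
  | cons c r ih =>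
    intro fuel cur acc h
    cases fuel with
    | zero => omega
    | succ f =>
      by_cases hc : c = '/'
      · subst hc
        have hstep : PySem.Chars.splitOn.go ['/'] (f+1) ('/' :: r) cur acc
            = PySem.Chars.splitOn.go ['/'] f r [] (cur.reverse :: acc) := by
          simp [PySem.Chars.splitOn.go, List.isPrefixOf]
        rw [hstep, ih f [] (cur.reverse :: acc) (by simp at h; omega)]
        rw [show pvSplitP ('/' :: r) = [] :: pvSplitP r from by simp [pvSplitP]]
        rw [pvSplitP_shape r]
        simp
      · have hstep : PySem.Chars.splitOn.go ['/'] (f+1) (c :: r) cur acc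
            = PySem.Chars.splitOn.go ['/'] f r (c :: cur) acc := by
          simp [PySem.Chars.splitOn.go, List.isPrefixOf, Ne.symm hc]
        rw [hstep, ih f (c :: cur) acc (by simp at h; omega)]
        rw [show pvSplitP (c :: r) = (c :: (pvSplitP r).headI) :: (pvSplitP r).tail from by
          simp [pvSplitP, hc]]
        simp

theorem pv_splitOn_eq (l : List Char) : PySem.Chars.splitOn l ['/'] = pvSplitP l := by
  unfold PySem.Chars.splitOn
  rw [pv_go_char l (l.length + 1) [] [] (by omega)]
  conv_rhs => rw [pvSplitP_shape l]
  simp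

-- intercalate on a nonempty-tail cons
theorem pv_intercalate_cons (s a : List Char) (l : List (List Char)) (h : l ≠ []) :
    List.intercalate s (a :: l) = a ++ s ++ List.intercalate s l := by
  cases l with
  | nil => exact absurd rfl h
  | cons b t => simp [List.intercalate, List.intersperse]

theorem pv_intercalate_SplitP : ∀ l : List Char, List.intercalate ['/'] (pvSplitP l) = l := by
  intro l
  induction l with
  | nil => simp [pvSplitP, List.intercalate]
  | cons c r ih =>
    by_cases hc : c = '/'
    · subst hc
      rw [show pvSplitP ('/' :: r) = [] :: pvSplitP r from by simp [pvSplitP]]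
      rw [pv_intercalate_cons _ _ _ (pvSplitP_ne_nil r), ih]
      simp
    · rw [show pvSplitP (c :: r) = (c :: (pvSplitP r).headI) :: (pvSplitP r).tail from by
        simp [pvSplitP, hc]]
      cases htl : (pvSplitP r).tail with
      | nil =>
        have hr : pvSplitP r = [(pvSplitP r).headI] := by
          conv_lhs => rw [pvSplitP_shape r, htl]
        have h2 : (pvSplitP r).headI = r := by
          have h3 := ih
          rw [hr] at h3
          simpa [List.intercalate] using h3
        simp [List.intercalate, h2]
      | cons x xs =>
        have hr : (pvSplitP r).headI ++ '/' :: List.intercalate ['/'] (x :: xs) = r := by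
          conv_rhs => rw [← ih]
          conv_rhs => rw [pvSplitP_shape r, htl]
          rw [pv_intercalate_cons ['/'] (pvSplitP r).headI (x :: xs) (by simp)]
          simp
        rw [pv_intercalate_cons _ _ _ (by simp)]
        rw [show (c :: (pvSplitP r).headI) ++ ['/'] ++ List.intercalate ['/'] (x :: xs)
            = c :: ((pvSplitP r).headI ++ '/' :: List.intercalate ['/'] (x :: xs)) from by simp]
        rw [hr]

theorem pv_noSlash_SplitP : ∀ (l : List Char) (x : List Char), x ∈ pvSplitP l → '/' ∉ x := by
  intro l
  induction l with
  | nil => intro x hx; simp [pvSplitP] at hx; simp [hx]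
  | cons c r ih =>
    intro x hx
    by_cases hc : c = '/'
    · subst hc
      rw [show pvSplitP ('/' :: r) = [] :: pvSplitP r from by simp [pvSplitP]] at hx
      rcases List.mem_cons.mp hx with h | h
      · simp [h]
      · exact ih x h
    · rw [show pvSplitP (c :: r) = (c :: (pvSplitP r).headI) :: (pvSplitP r).tail from by
        simp [pvSplitP, hc]] at hx
      rcases List.mem_cons.mp hx with h | h
      · subst h
        intro hmem
        rcases List.mem_cons.mp hmem with h' | h'
        · exact hc h'.symm
        · exact ih _ (by rw [pvSplitP_shape r]; exact List.mem_cons_self) h'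
      · exact ih x (by rw [pvSplitP_shape r]; exact List.mem_cons_of_mem _ h)

theorem pv_SplitP_append : ∀ (a b : List Char), pvSplitP (a ++ '/' :: b) = pvSplitP a ++ pvSplitP b := by
  intro a b
  induction a with
  | nil => simp [pvSplitP]
  | cons c a' ih =>
    by_cases hc : c = '/'
    · subst hc; simp [pvSplitP, ih]
    · simp only [List.cons_append]
      rw [show pvSplitP (c :: (a' ++ '/' :: b)) = (c :: (pvSplitP (a' ++ '/' :: b)).headI) :: (pvSplitP (a' ++ '/' :: b)).tail from by
        simp [pvSplitP, hc]]
      rw [show pvSplitP (c :: a') = (c :: (pvSplitP a').headI) :: (pvSplitP a').tail from by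
        simp [pvSplitP, hc]]
      rw [ih]
      cases ha : pvSplitP a' with
      | nil => exact absurd ha (pvSplitP_ne_nil a')
      | cons y ys => simp

theorem pv_SplitP_noSlash (l : List Char) (h : '/' ∉ l) : pvSplitP l = [l] := by
  induction l with
  | nil => simp [pvSplitP]
  | cons c r ih =>
    have hc : c ≠ '/' := fun hh => h (by simp [hh])
    rw [show pvSplitP (c :: r) = (c :: (pvSplitP r).headI) :: (pvSplitP r).tail from by
      simp [pvSplitP, hc]]
    rw [ih (fun hh => h (by simp [hh]))]
    simp

theorem pv_SplitP_flatMap : ∀ (ps : List (List Char)), ps ≠ [] →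
    pvSplitP (List.intercalate ['/'] ps) = ps.flatMap pvSplitP := by
  intro ps
  induction ps with
  | nil => intro h; exact absurd rfl h
  | cons a t ih =>
    intro _
    cases t with
    | nil => simp [List.intercalate]
    | cons b t' =>
      rw [pv_intercalate_cons _ _ _ (by simp)]
      rw [show a ++ ['/'] ++ List.intercalate ['/'] (b :: t') = a ++ '/' :: List.intercalate ['/'] (b :: t') from by simp]
      rw [pv_SplitP_append, ih (by simp)]
      simp

theorem pv_intercalate_append_ne : ∀ (a b : List (List Char)), a ≠ [] → b ≠ [] →
    List.intercalate ['/'] (a ++ b) = List.intercalate ['/'] a ++ '/' :: List.intercalate ['/'] b := by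
  intro a
  induction a with
  | nil => intro b h _; exact absurd rfl h
  | cons x a' ih =>
    intro b _ hb
    cases a' with
    | nil =>
      rw [show ([x] : List (List Char)) ++ b = x :: b from by simp]
      rw [pv_intercalate_cons _ _ _ hb]
      simp [List.intercalate]
    | cons y a'' =>
      rw [show (x :: y :: a'') ++ b = x :: ((y :: a'') ++ b) from by simp]
      rw [pv_intercalate_cons _ _ _ (by simp), ih b (by simp) hb]
      rw [pv_intercalate_cons ['/'] x (y :: a'') (by simp)]
      simp

theorem pv_intercalate_flatten : ∀ (ll : List (List (List Char))), (∀ c ∈ ll, c ≠ []) →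
    List.intercalate ['/'] (ll.map (List.intercalate ['/'])) = List.intercalate ['/'] ll.flatten := by
  intro ll
  induction ll with
  | nil => intro _; simp [List.intercalate]
  | cons c t ih =>
    intro h
    cases t with
    | nil => simp [List.intercalate]
    | cons d t' =>
      have hflat : (d :: t').flatten ≠ [] := by
        have hd : d ≠ [] := h d (by simp)
        cases d with
        | nil => exact absurd rfl hd
        | cons z zs => simp
      rw [List.map_cons, pv_intercalate_cons _ _ _ (by simp)]
      rw [ih (fun x hx => h x (by simp [hx]))]
      rw [show (c :: d :: t').flatten = c ++ (d :: t').flatten from by simp]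
      rw [pv_intercalate_append_ne _ _ ?_ ?_]
      · simp
      · -- c ≠ [] as a list of pieces?  c is a List (List Char) element: c ≠ []
        exact h c (by simp)
      · exact hflat

-- ===== string-level wrappers =====

theorem pv_split_eq (p : String) : pvSplit p = (pvSplitP p.toList).map String.ofList := by
  simp [pvSplit, PySem.Str.split?, PySem.Chars.split?, pv_splitOn_eq]

theorem pv_join_toList (l : List String) :
    (PySem.Str.join "/" l).toList = List.intercalate ['/'] (l.map String.toList) := by
  simp [PySem.Str.join, PySem.Chars.join]

theorem pv_map_toList_ofList : ∀ ps : List (List Char), ps.map (String.toList ∘ String.ofList) = ps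
  | [] => rfl
  | a :: t => by simp [String.toList_ofList, pv_map_toList_ofList t]

theorem pv_split_ne (p : String) : pvSplit p ≠ [] := by
  rw [pv_split_eq]
  simpa using pvSplitP_ne_nil p.toList

theorem pv_join_split (p : String) : PySem.Str.join "/" (pvSplit p) = p := by
  apply String.toList_inj.mp
  rw [pv_join_toList, pv_split_eq, List.map_map, pv_map_toList_ofList, pv_intercalate_SplitP]

theorem pv_split_join (l : List String) (h : l ≠ []) :
    pvSplit (PySem.Str.join "/" l) = l.flatMap pvSplit := by
  rw [pv_split_eq]
  rw [show (PySem.Str.join "/" l).toList = List.intercalate ['/'] (l.map String.toList) from pv_join_toList l]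
  rw [pv_SplitP_flatMap _ (by simpa using h)]
  rw [List.flatMap_map]
  rw [List.map_flatMap]
  apply List.flatMap_congr  -- may not exist; fallback below
  intro s _
  rw [pv_split_eq]

theorem pv_join_singleton (x : String) : PySem.Str.join "/" [x] = x := by
  apply String.toList_inj.mp
  rw [pv_join_toList]
  simp [List.intercalate]

theorem pv_join_flat (ll : List (List String)) (h : ∀ c ∈ ll, c ≠ []) :
    PySem.Str.join "/" (ll.map (PySem.Str.join "/")) = PySem.Str.join "/" ll.flatten := by
  apply String.toList_inj.mp
  rw [pv_join_toList, pv_join_toList]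
  rw [List.map_map]
  have : (ll.map fun c => (PySem.Str.join "/" c).toList)
      = (ll.map (List.map String.toList)).map (List.intercalate ['/']) := by
    rw [List.map_map]
    apply List.map_congr_left
    intro c _
    exact pv_join_toList c
  rw [show ll.map (String.toList ∘ PySem.Str.join "/") = ll.map fun c => (PySem.Str.join "/" c).toList from rfl, this]
  rw [pv_intercalate_flatten _ ?_]
  · rw [← List.map_flatten]
  · intro c hc
    obtain ⟨c', hc', rfl⟩ := List.mem_map.mp hc
    have := h c' hc'
    cases c' with
    | nil => exact absurd rfl this
    | cons z zs => simp

theorem pv_noSlash_mem (p : String) (e : String) (h : e ∈ pvSplit p) : '/' ∉ e.toList := by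
  rw [pv_split_eq] at h
  obtain ⟨x, hx, rfl⟩ := List.mem_map.mp h
  rw [String.toList_ofList]
  exact pv_noSlash_SplitP p.toList x hx

theorem pv_split_self (e : String) (h : '/' ∉ e.toList) : pvSplit e = [e] := by
  rw [pv_split_eq, pv_SplitP_noSlash e.toList h]
  simp

theorem pv_dollar_mem (e : String) : PySem.Str.isIn "$" e = true ↔ '$' ∈ e.toList := by
  rw [PySem.Str.isIn_iff_infix]
  exact List.singleton_infix_iff '$' e.toList

theorem pv_chars_false (e : String) (h : PySem.Str.isIn "$" e = false) :
    PySem.Chars.isIn ['$'] e.toList = false := by simpa using h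

theorem pv_mem_intercalate_of_mem (c : Char) (x : List Char) :
    ∀ (l : List (List Char)), c ∈ x → x ∈ l → c ∈ List.intercalate ['/'] l := by
  intro l
  induction l with
  | nil => intro _ h; simp at h
  | cons a t ih =>
    intro hc hm
    cases t with
    | nil => simp at hm; subst hm; simpa [List.intercalate] using hc
    | cons b t' =>
      rw [pv_intercalate_cons _ _ _ (by simp)]
      rcases List.mem_cons.mp hm with hm | hm
      · simp [hm ▸ hc]
      · simp [ih hc hm]

theorem pv_mem_of_mem_intercalate (c : Char) :
    ∀ (l : List (List Char)), c ∈ List.intercalate ['/'] l → c = '/' ∨ ∃ x ∈ l, c ∈ x := by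
  intro l
  induction l with
  | nil => intro h; simp [List.intercalate] at h
  | cons a t ih =>
    intro h
    cases t with
    | nil => simp [List.intercalate] at h; exact Or.inr ⟨a, by simp, h⟩
    | cons b t' =>
      rw [pv_intercalate_cons _ _ _ (by simp)] at h
      rcases List.mem_append.mp h with h | h
      · rcases List.mem_append.mp h with h | h
        · exact Or.inr ⟨a, by simp, h⟩
        · exact Or.inl (by simpa using h)
      · rcases ih h with h' | ⟨x, hx, hcx⟩
        · exact Or.inl h'
        · exact Or.inr ⟨x, by simp [hx], hcx⟩

-- '$' does not occur in a join of '$'-free pieces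
theorem pv_join_no_dollar (l : List String) (h : ∀ x ∈ l, PySem.Str.isIn "$" x = false) :
    PySem.Str.isIn "$" (PySem.Str.join "/" l) = false := by
  by_contra hcon
  have htrue : PySem.Str.isIn "$" (PySem.Str.join "/" l) = true := by
    cases hh : PySem.Str.isIn "$" (PySem.Str.join "/" l) with
    | false => exact absurd hh hcon
    | true => rfl
  have hmem : '$' ∈ List.intercalate ['/'] (l.map String.toList) := by
    rw [← pv_join_toList]
    exact (pv_dollar_mem _).mp htrue
  rcases pv_mem_of_mem_intercalate '$' _ hmem with h' | ⟨x, hx, hcx⟩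
  · simp at h'
  · obtain ⟨e, he, rfl⟩ := List.mem_map.mp hx
    have := h e he
    rw [(pv_dollar_mem e).mpr hcx] at this
    simp at this

-- a '$'-free string splits into '$'-free elements
theorem pv_elem_no_dollar (p : String) (hp : PySem.Str.isIn "$" p = false)
    (e : String) (he : e ∈ pvSplit p) : PySem.Str.isIn "$" e = false := by
  by_contra hcon
  have hd : PySem.Str.isIn "$" e = true := by
    cases hh : PySem.Str.isIn "$" e with
    | false => exact absurd hh hcon
    | true => rfl
  have hmem : '$' ∈ e.toList := (pv_dollar_mem e).mp hd
  rw [pv_split_eq] at he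
  obtain ⟨x, hx, rfl⟩ := List.mem_map.mp he
  rw [String.toList_ofList] at hmem
  have : '$' ∈ p.toList := by
    rw [← pv_intercalate_SplitP p.toList]
    exact pv_mem_intercalate_of_mem '$' x (pvSplitP p.toList) hmem hx
  rw [(pv_dollar_mem p).mpr this] at hp
  simp at hp

-- ===== the two ports, restated structurally =====

-- element-wise resolution used by one pass of A
def pvG (js : List (String × List (String × String))) (e : String) : String :=
  if PySem.Str.isIn "$" e then pvLookupA js e else e

-- element-wise resolution used by B at recursion fuel `fuel`
def pvF (js : List (String × List (String × String))) (fuel : Nat) (e : String) : String :=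
  if PySem.Str.isIn "$" e then
    let v := pvLookupA js e
    if PySem.Str.isIn "$" v then pvResolveB js fuel v else v
  else e

theorem pv_resolve_succ (js : List (String × List (String × String))) (fuel : Nat) (p : String) :
    pvResolveB js (fuel + 1) p = PySem.Str.join "/" ((pvSplit p).map (pvF js fuel)) := by
  rfl

-- A's rebuild loop over enumerate, indices ≥ 1: appends '/' ++ resolved element for each element
theorem pv_foldA (js : List (String × List (String × String))) :
    ∀ (t : List String) (k : Int) (s : String), 1 ≤ k →
    ((PySem.List.enumerate t k).foldl
      (fun finalmorphpath ie =>
        let element := if PySem.Str.isIn "$" ie.2 then pvLookupA js ie.2 else ie.2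
        if ie.1 == 0 then element else finalmorphpath ++ "/" ++ element) s).toList
    = s.toList ++ (t.map (fun e => '/' :: (pvG js e).toList)).flatten := by
  intro t
  induction t with
  | nil => intro k s hk; simp [PySem.List.enumerate]
  | cons x t ih =>
    intro k s hk
    have hcons : PySem.List.enumerate (x :: t) k = (k, x) :: PySem.List.enumerate t (k+1) := by
      simp [PySem.List.enumerate]
    have hne : (k == 0) = false := by simp; omega
    rw [hcons, List.foldl_cons]
    simp only [hne, if_false, Bool.false_eq_true]
    rw [ih (k+1) _ (by omega)]
    simp [String.toList_append, pvG]

theorem pv_intercalate_cons_flatten :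
    ∀ (l : List (List Char)) (a : List Char),
      List.intercalate ['/'] (a :: l) = a ++ (l.map (fun x => '/' :: x)).flatten := by
  intro l
  induction l with
  | nil => intro a; simp [List.intercalate]
  | cons b t ih =>
    intro a
    rw [pv_intercalate_cons _ _ _ (by simp), ih b]
    simp

-- one pass of A's while-loop body is '/'.join of the element-wise resolution
theorem pv_passA_eq (js : List (String × List (String × String))) (p : String) :
    pvPassA js p = PySem.Str.join "/" ((pvSplit p).map (pvG js)) := by
  obtain ⟨e0, t, hsplit⟩ : ∃ e0 t, pvSplit p = e0 :: t := by
    cases hs : pvSplit p with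
    | nil => exact absurd hs (pv_split_ne p)
    | cons a b => exact ⟨a, b, rfl⟩
  apply String.toList_inj.mp
  have hsplit' : (PySem.Str.split? p "/").getD [] = e0 :: t := hsplit
  simp only [pvPassA]
  rw [hsplit']
  conv_rhs => rw [hsplit]
  have hcons : PySem.List.enumerate (e0 :: t) 0 = ((0 : Int), e0) :: PySem.List.enumerate t 1 := by
    simp [PySem.List.enumerate]
  rw [hcons, List.foldl_cons]
  simp only [show ((0 : Int) == 0) = true from rfl, if_true]
  rw [pv_foldA js t 1 _ (by omega)]
  rw [pv_join_toList, List.map_cons, List.map_cons, pv_intercalate_cons_flatten, List.map_map]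
  simp [Function.comp_def, pvG]

-- under pvOk (n+1), a '$'-element of the split has a manifest value ok at level n
theorem pv_ok_elem (js : List (String × List (String × String))) (n : Nat) (p e : String)
    (hok : pvOk js (n + 1) p = true) (he : e ∈ pvSplit p)
    (hd : PySem.Str.isIn "$" e = true) :
    ∃ m v, (PySem.Dict.mk js).get? "manifest" = some m ∧ (PySem.Dict.mk m).get? e = some v ∧
      pvOk js n v = true ∧ pvLookupA js e = v := by
  unfold pvOk at hok
  have h := (List.all_eq_true.mp hok) e he
  rw [hd] at h
  simp only [Bool.not_true, Bool.false_or] at h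
  cases hm : (PySem.Dict.mk js).get? "manifest" with
  | none => rw [hm] at h; simp at h
  | some m =>
    rw [hm] at h
    simp only [] at h
    cases hv : (PySem.Dict.mk m).get? e with
    | none => rw [hv] at h; simp at h
    | some v =>
      rw [hv] at h
      refine ⟨m, v, rfl, hv, by simpa using h, ?_⟩
      simp [pvLookupA, hm, hv]

-- after one pass of A, the remaining budget drops by one
theorem pv_okA (js : List (String × List (String × String))) :
    ∀ (n : Nat) (p : String), pvOk js (n + 1) p = true → pvOk js n (pvPassA js p) = true := by
  intro n p hok
  rw [pv_passA_eq]
  cases n with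
  | zero =>
    unfold pvOk
    rw [Bool.not_eq_true']
    apply pv_join_no_dollar
    intro x hx
    obtain ⟨e, he, rfl⟩ := List.mem_map.mp hx
    by_cases hd : PySem.Str.isIn "$" e = true
    · obtain ⟨m, v, hm, hv, hvok, hlook⟩ := pv_ok_elem js 0 p e hok he hd
      unfold pvOk at hvok
      simp only [pvG, hd, if_true, hlook]
      simpa using hvok
    · rw [Bool.not_eq_true] at hd
      simp [pvG, pv_chars_false e hd]
  | succ k =>
    unfold pvOk
    apply List.all_eq_true.mpr
    intro x hx
    rw [show (PySem.Str.split? (PySem.Str.join "/" ((pvSplit p).map (pvG js))) "/").getD []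
        = pvSplit (PySem.Str.join "/" ((pvSplit p).map (pvG js))) from rfl] at hx
    rw [pv_split_join _ (by
      cases hs : pvSplit p with
      | nil => exact absurd hs (pv_split_ne p)
      | cons a b => simp [hs])] at hx
    rw [List.flatMap_map] at hx
    obtain ⟨e, he, hxe⟩ := List.mem_flatMap.mp hx
    by_cases hd : PySem.Str.isIn "$" e = true
    · obtain ⟨m, v, hm, hv, hvok, hlook⟩ := pv_ok_elem js (k+1) p e hok he hd
      simp only [Function.comp, pvG, hd, if_true, hlook] at hxe
      unfold pvOk at hvok
      exact (List.all_eq_true.mp hvok) x hxe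
    · rw [Bool.not_eq_true] at hd
      simp only [Function.comp, pvG, hd, Bool.false_eq_true, if_false] at hxe
      rw [pv_split_self e (pv_noSlash_mem p e he)] at hxe
      simp at hxe
      subst hxe
      rw [hd]
      rfl

-- B's recursion is fuel-stable once the budget suffices
theorem pv_Bstab (js : List (String × List (String × String))) :
    ∀ (n : Nat) (p : String) (f1 f2 : Nat), pvOk js n p = true → n ≤ f1 → n ≤ f2 →
      pvResolveB js (f1 + 1) p = pvResolveB js (f2 + 1) p := by
  intro n
  induction n with
  | zero =>
    intro p f1 f2 hok _ _
    unfold pvOk at hok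
    rw [pv_resolve_succ, pv_resolve_succ]
    have hid : ∀ f, (pvSplit p).map (pvF js f) = pvSplit p := by
      intro f
      conv_rhs => rw [← List.map_id (pvSplit p)]
      apply List.map_congr_left
      intro e he
      have hd := pv_elem_no_dollar p (by simpa using hok) e he
      simp [pvF, pv_chars_false e hd]
    rw [hid, hid]
  | succ k ih =>
    intro p f1 f2 hok h1 h2
    rw [pv_resolve_succ, pv_resolve_succ]
    congr 1
    apply List.map_congr_left
    intro e he
    by_cases hd : PySem.Str.isIn "$" e = true
    · obtain ⟨m, v, hm, hv, hvok, hlook⟩ := pv_ok_elem js k p e hok he hd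
      simp only [pvF, hd, if_true, hlook]
      by_cases hdv : PySem.Str.isIn "$" v = true
      · simp only [hdv, if_true]
        obtain ⟨f1', rfl⟩ : ∃ f1', f1 = f1' + 1 := ⟨f1 - 1, by omega⟩
        obtain ⟨f2', rfl⟩ : ∃ f2', f2 = f2' + 1 := ⟨f2 - 1, by omega⟩
        exact ih v f1' f2' hvok (by omega) (by omega)
      · rw [Bool.not_eq_true] at hdv
        simp [pv_chars_false v hdv]
    · rw [Bool.not_eq_true] at hd
      simp [pvF, pv_chars_false e hd]

set_option maxHeartbeats 1000000 in
-- main induction: A's fixpoint loop equals B's recursive descent, given budget n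
theorem pv_main (js : List (String × List (String × String))) :
    ∀ (n : Nat) (p : String) (fA fB : Nat), pvOk js n p = true → n < fA → n ≤ fB →
      pvLoopA js fA p = pvResolveB js (fB + 1) p := by
  intro n
  induction n with
  | zero =>
    intro p fA fB hok hA _
    unfold pvOk at hok
    have hp : PySem.Str.isIn "$" p = false := by simpa using hok
    obtain ⟨fA', rfl⟩ : ∃ fA', fA = fA' + 1 := ⟨fA - 1, by omega⟩
    unfold pvLoopA
    rw [hp]
    simp only [Bool.false_eq_true, if_false]
    rw [pv_resolve_succ]
    have hid : (pvSplit p).map (pvF js fB) = pvSplit p := by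
      conv_rhs => rw [← List.map_id (pvSplit p)]
      apply List.map_congr_left
      intro e he
      have hd := pv_elem_no_dollar p hp e he
      simp [pvF, pv_chars_false e hd]
    rw [hid, pv_join_split]
  | succ k ih =>
    intro p fA fB hok hA hB
    obtain ⟨fA', rfl⟩ : ∃ fA', fA = fA' + 1 := ⟨fA - 1, by omega⟩
    by_cases hp : PySem.Str.isIn "$" p = true
    · -- A performs one pass and recurses; B: one level of descent
      unfold pvLoopA
      rw [hp]
      simp only [if_true]
      have hokp := pv_okA js k p hok
      rw [ih (pvPassA js p) fA' k hokp (by omega) (le_refl k)]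
      -- now: resolve (k+1) (pass p) = resolve (fB+1) p
      rw [pv_resolve_succ, pv_resolve_succ]
      rw [pv_passA_eq]
      rw [pv_split_join _ (by
        cases hs : pvSplit p with
        | nil => exact absurd hs (pv_split_ne p)
        | cons a b => simp [hs])]
      rw [List.flatMap_map, List.map_flatMap]
      rw [show ((pvSplit p).flatMap fun e => (pvSplit (pvG js e)).map (pvF js k))
          = ((pvSplit p).map fun e => (pvSplit (pvG js e)).map (pvF js k)).flatten from
        List.flatMap_def]
      rw [← pv_join_flat _ ?nonempty]
      case nonempty =>
        intro c hc
        obtain ⟨e, he, rfl⟩ := List.mem_map.mp hc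
        cases hs : pvSplit (pvG js e) with
        | nil => exact absurd hs (pv_split_ne _)
        | cons a b => simp [hs]
      rw [List.map_map]
      congr 1
      apply List.map_congr_left
      intro e he
      by_cases hd : PySem.Str.isIn "$" e = true
      · obtain ⟨m, v, hm, hv, hvok, hlook⟩ := pv_ok_elem js k p e hok he hd
        simp only [Function.comp, pvG, pvF, hd, if_true, hlook]
        by_cases hdv : PySem.Str.isIn "$" v = true
        · simp only [hdv, if_true]
          -- join of mapped pieces of v at fuel k = resolve (k+1) v = resolve fB v
          rw [← pv_resolve_succ]
          obtain ⟨fB', rfl⟩ : ∃ fB', fB = fB' + 1 := ⟨fB - 1, by omega⟩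
          exact pv_Bstab js k v k fB' hvok (le_refl k) (by omega)
        · rw [Bool.not_eq_true] at hdv
          simp only [hdv, Bool.false_eq_true, if_false]
          have hidv : (pvSplit v).map (pvF js k) = pvSplit v := by
            conv_rhs => rw [← List.map_id (pvSplit v)]
            apply List.map_congr_left
            intro x hx
            have hdx := pv_elem_no_dollar v hdv x hx
            simp [pvF, pv_chars_false x hdx]
          rw [hidv, pv_join_split]
      · rw [Bool.not_eq_true] at hd
        simp only [Function.comp, pvG, pvF, hd, Bool.false_eq_true, if_false]
        rw [pv_split_self e (pv_noSlash_mem p e he)]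
        simp only [List.map_cons, List.map_nil]
        simp [pvF, pv_chars_false e hd, pv_join_singleton]
    · rw [Bool.not_eq_true] at hp
      unfold pvLoopA
      rw [hp]
      simp only [Bool.false_eq_true, if_false]
      rw [pv_resolve_succ]
      have hid : (pvSplit p).map (pvF js fB) = pvSplit p := by
        conv_rhs => rw [← List.map_id (pvSplit p)]
        apply List.map_congr_left
        intro e he
        have hd := pv_elem_no_dollar p hp e he
        simp [pvF, pv_chars_false e hd]
      rw [hid, pv_join_split]

-- ===== VERDICT (by name: the statement is the Claim_ definition above) =====
theorem remove_variables_spec : Claim_equal_remove_variables := by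
  intro js p _hdom hpre
  unfold Spec_remove_variables remove_variables remove_variables_alt
  unfold Pre_remove_variables at hpre
  exact pv_main js ((((PySem.Dict.mk js).get? "manifest").getD []).length + 2) p _ _ hpre
    (by omega) (by omega)
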